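-- pv_equiv track=rewrite | github.com/Chidopro/youtube-clone-backend | backend/printful_catalog.py | _youth_bella_letter_size_alternates
-- ===== SOURCE A (Python) =====
-- from typing import Any, Dict, List, Optional, Tuple
--
-- def _youth_bella_letter_size_alternates(sz: str) -> List[str]:
--     letter = str(sz or "").strip()
--     m = {
--         "XS": ("YXS",),
--         "S": ("YS",),
--         "M": ("YM",),
--         "L": ("YL",),
--         "XL": ("YXL",),
--     }
--     return [x for x in m.get(letter, ()) if x]
-- ===== SOURCE B (Python) =====
-- def _youth_bella_letter_size_alternates(sz: str) -> list:
--     t = str(sz or "").strip()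
--     # Recognize a valid youth size with a tiny DFA over the characters:
--     # state 0 --'X'--> state 1; state 0 --'S'/'M'/'L'--> state 2 (accepting);
--     # state 1 --'S'/'L'--> state 2; anything else rejects.
--     state = 0
--     for c in t:
--         if state == 0 and c == 'X':
--             state = 1
--         elif state == 0 and c in 'SML':
--             state = 2
--         elif state == 1 and c in 'SL':
--             state = 2
--         else:
--             return []
--     return ['Y' + t] if state == 2 else []
-- ===== Notes on version B (the rewrite author's own statement) =====
-- stated objective: alternative
-- what changed: Replaces the letter-to-tuple lookup table and truthiness-filtering comprehension by a character-level finite automaton that scans the stripped string once (an optional X-prefix state, then an accepting state on the base letter) and builds the result by prefixing the letter; no table and no whole-string membership test.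
import Mathlib
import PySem

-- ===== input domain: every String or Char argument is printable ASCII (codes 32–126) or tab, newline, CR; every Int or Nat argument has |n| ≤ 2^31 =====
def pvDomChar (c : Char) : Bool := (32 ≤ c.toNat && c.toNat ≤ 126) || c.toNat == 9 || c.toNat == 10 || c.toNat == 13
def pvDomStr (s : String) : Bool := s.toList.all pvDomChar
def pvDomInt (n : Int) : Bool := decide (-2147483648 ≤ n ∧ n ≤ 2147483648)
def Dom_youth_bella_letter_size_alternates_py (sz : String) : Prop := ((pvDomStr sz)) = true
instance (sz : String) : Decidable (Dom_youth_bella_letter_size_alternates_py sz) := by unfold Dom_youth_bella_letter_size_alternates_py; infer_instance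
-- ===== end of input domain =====

-- B replaces A's lookup table by a tiny character DFA recognizing valid youth sizes (alternative decomposition).


-- ===== PORT A =====
def youth_bella_letter_size_alternates_py (sz : String) : List String :=
  -- letter = str(sz or "").strip()  ('sz or ""' is sz itself unless sz is empty)
  let letter := PySem.Str.strip (if sz = "" then "" else sz)
  let m : PySem.Dict String (List String) :=
    PySem.Dict.ofList [("XS", ["YXS"]), ("S", ["YS"]), ("M", ["YM"]), ("L", ["YL"]), ("XL", ["YXL"])]
  -- [x for x in m.get(letter, ()) if x]
  (m.getD letter []).filter (fun x => decide (x ≠ ""))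

-- ===== PORT B =====
-- The loop of Source B: fold over the characters with the DFA state; Python's
-- early 'return []' inside the loop is the 'none' outcome.
def pvRunDFA : List Char → Nat → Option Nat
  | [], st => some st
  | c :: rest, st =>
    if st = 0 ∧ c = 'X' then pvRunDFA rest 1
    else if st = 0 ∧ (c = 'S' ∨ c = 'M' ∨ c = 'L') then pvRunDFA rest 2
    else if st = 1 ∧ (c = 'S' ∨ c = 'L') then pvRunDFA rest 2
    else none

def youth_bella_letter_size_alternates_py_alt (sz : String) : List String :=
  let t := PySem.Str.strip (if sz = "" then "" else sz)
  match pvRunDFA t.toList 0 with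
  | none => []
  | some st => if st = 2 then ["Y" ++ t] else []

-- ===== PRECONDITION & SPEC =====
def Spec_youth_bella_letter_size_alternates_py (sz : String) (out : List String) : Prop := out = youth_bella_letter_size_alternates_py_alt sz
instance (sz : String) (out : List String) : Decidable (Spec_youth_bella_letter_size_alternates_py sz out) := by unfold Spec_youth_bella_letter_size_alternates_py; infer_instance

-- ===== CLAIM (what is proved, stated in full; the proofs are below) =====
def Claim_equal_youth_bella_letter_size_alternates_py : Prop := ∀ (sz : String), Dom_youth_bella_letter_size_alternates_py sz → Spec_youth_bella_letter_size_alternates_py sz (youth_bella_letter_size_alternates_py sz)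

-- ===== LEMMAS AND PROOFS =====

-- From the accepting state 2 no transition exists: only the empty remainder accepts.
theorem pvRunDFA_two (l : List Char) (h : l ≠ []) : pvRunDFA l 2 = none := by
  cases l with
  | nil => exact absurd rfl h
  | cons c rest => simp [pvRunDFA]

-- From state 1 (just read 'X') exactly one more 'S' or 'L' is accepted.
theorem pvRunDFA_one (l : List Char) :
    pvRunDFA l 1 = some 2 ↔ (l = ['S'] ∨ l = ['L']) := by
  cases l with
  | nil => simp [pvRunDFA]
  | cons c rest =>
    by_cases hc : c = 'S' ∨ c = 'L'
    · cases rest with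
      | nil =>
        simp [pvRunDFA, hc]
      | cons d rest' =>
        simp [pvRunDFA, hc]
    · have hs : c ≠ 'S' := fun h => hc (Or.inl h)
      have hl : c ≠ 'L' := fun h => hc (Or.inr h)
      simp [pvRunDFA, hs, hl]

-- Full characterization of the language the DFA accepts from the start state.
theorem pvRunDFA_zero (l : List Char) :
    pvRunDFA l 0 = some 2 ↔
      (l = ['S'] ∨ l = ['M'] ∨ l = ['L'] ∨ l = ['X', 'S'] ∨ l = ['X', 'L']) := by
  cases l with
  | nil => simp [pvRunDFA]
  | cons c rest =>
    by_cases hx : c = 'X'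
    · subst hx
      simp [pvRunDFA, pvRunDFA_one]
    · by_cases hv : c = 'S' ∨ c = 'M' ∨ c = 'L'
      · cases rest with
        | nil =>
          simp [pvRunDFA, hx, hv]
        | cons d rest' =>
          simp [pvRunDFA, hx, pvRunDFA_two (d :: rest') (by simp)]
      · have h1 : c ≠ 'S' := fun h => hv (Or.inl h)
        have h2 : c ≠ 'M' := fun h => hv (Or.inr (Or.inl h))
        have h3 : c ≠ 'L' := fun h => hv (Or.inr (Or.inr h))
        simp [pvRunDFA, hx, h1, h2, h3]

-- A's table lookup + truthiness filter, in closed form over the stripped letter.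
theorem pv_table_eq (t : String) :
    ((PySem.Dict.ofList [("XS", ["YXS"]), ("S", ["YS"]), ("M", ["YM"]), ("L", ["YL"]), ("XL", ["YXL"])]
        : PySem.Dict String (List String)).getD t []).filter (fun x => decide (x ≠ ""))
      = if t ∈ ["XS", "S", "M", "L", "XL"] then ["Y" ++ t] else [] := by
  by_cases h1 : t = "XS"; · subst h1; decide
  by_cases h2 : t = "S";  · subst h2; decide
  by_cases h3 : t = "M";  · subst h3; decide
  by_cases h4 : t = "L";  · subst h4; decide
  by_cases h5 : t = "XL"; · subst h5; decide
  have hmem : t ∉ (["XS", "S", "M", "L", "XL"] : List String) := by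
    simp [h1, h2, h3, h4, h5]
  rw [if_neg hmem]
  have hd : (PySem.Dict.ofList [("XS", ["YXS"]), ("S", ["YS"]), ("M", ["YM"]), ("L", ["YL"]), ("XL", ["YXL"])]
      : PySem.Dict String (List String))
      = PySem.Dict.mk [("XS", ["YXS"]), ("S", ["YS"]), ("M", ["YM"]), ("L", ["YL"]), ("XL", ["YXL"])] := by
    decide
  rw [hd]
  have g1 : (("XS" : String) == t) = false := by simpa [beq_iff_eq] using fun h => h1 h.symm
  have g2 : (("S" : String) == t) = false := by simpa [beq_iff_eq] using fun h => h2 h.symm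
  have g3 : (("M" : String) == t) = false := by simpa [beq_iff_eq] using fun h => h3 h.symm
  have g4 : (("L" : String) == t) = false := by simpa [beq_iff_eq] using fun h => h4 h.symm
  have g5 : (("XL" : String) == t) = false := by simpa [beq_iff_eq] using fun h => h5 h.symm
  simp [PySem.Dict.getD, PySem.Dict.get?, List.find?, g1, g2, g3, g4, g5]

-- B's DFA outcome, in the same closed form over the stripped letter.
theorem pv_dfa_eq (t : String) :
    (match pvRunDFA t.toList 0 with
      | none => []
      | some st => if st = 2 then ["Y" ++ t] else [])
      = if t ∈ ["XS", "S", "M", "L", "XL"] then ["Y" ++ t] else [] := by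
  by_cases hmem : t ∈ (["XS", "S", "M", "L", "XL"] : List String)
  · rw [if_pos hmem]
    have hrun : pvRunDFA t.toList 0 = some 2 := by
      fin_cases hmem <;> decide
    simp [hrun]
  · rw [if_neg hmem]
    have hrun : pvRunDFA t.toList 0 ≠ some 2 := by
      intro h
      apply hmem
      rcases (pvRunDFA_zero t.toList).mp h with h' | h' | h' | h' | h' <;>
        [ (have : t = "S" := String.toList_inj.mp (by rw [h']; decide));
          (have : t = "M" := String.toList_inj.mp (by rw [h']; decide));
          (have : t = "L" := String.toList_inj.mp (by rw [h']; decide));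
          (have : t = "XS" := String.toList_inj.mp (by rw [h']; decide));
          (have : t = "XL" := String.toList_inj.mp (by rw [h']; decide)) ] <;>
        subst this <;> simp
    cases hr : pvRunDFA t.toList 0 with
    | none => rfl
    | some st =>
      have hst : st ≠ 2 := fun h => hrun (by rw [hr, h])
      simp [hst]

-- ===== VERDICT (by name: the statement is the Claim_ definition above) =====
theorem youth_bella_letter_size_alternates_py_spec : Claim_equal_youth_bella_letter_size_alternates_py := by
  intro sz _
  unfold Spec_youth_bella_letter_size_alternates_py
  unfold youth_bella_letter_size_alternates_py youth_bella_letter_size_alternates_py_alt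
  rw [pv_table_eq, pv_dfa_eq]
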